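-- pv_equiv track=rewrite | github.com/leo930206/ncku1131-introduction-to-data-science | HW0/hw0_p2.py | top_3_directors_most_actors
-- ===== SOURCE A (Python) =====
-- def get_column_index(header, column_name):
--     return header.index(column_name)
--
-- def top_3_directors_most_actors(header, data):
--     director_idx = get_column_index(header, 'Director')
--     actors_idx = get_column_index(header, 'Actors')
--
--     director_actors = {}
--
--     for row in data:
--         director = row[director_idx].strip()
--         actors = set(row[actors_idx].split('|'))
--
--         if director not in director_actors:
--             director_actors[director] = set()
--         director_actors[director].update(actors)
--
--     director_actor_count = {director: len(actors) for director, actors in director_actors.items()}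
--     sorted_directors = sorted(director_actor_count, key=director_actor_count.get, reverse=True)
--
--     return sorted_directors[:3]
-- ===== SOURCE B (Python) =====
-- def top_3_directors_most_actors(header, data):
--     director_idx = header.index('Director')
--     actors_idx = header.index('Actors')
--
--     # Stage 1: group the raw Actors cells by (stripped) director, first-appearance order.
--     cells = {}
--     for row in data:
--         cells.setdefault(row[director_idx].strip(), []).append(row[actors_idx])
--
--     # Stage 2: one bounded-insertion pass keeps only the current top 3
--     # (count descending, ties by first appearance) -- no full sort.
--     top = []
--     for director, cell_list in cells.items():
--         count = len({actor for cell in cell_list for actor in cell.split('|')})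
--         i = 0
--         while i < len(top) and top[i][1] >= count:
--             i += 1
--         top.insert(i, (director, count))
--         del top[3:]
--     return [director for director, _ in top]
-- ===== Notes on version B (the rewrite author's own statement) =====
-- stated objective: alternative
-- what changed: B first groups the raw Actors cells per director in one pass and counts each director's distinct actors from its group, then finds the top 3 with a bounded insertion pass that keeps only the current best three (no full sort of all directors), instead of A's incremental dict-of-sets plus a full reverse sort.
import Mathlib
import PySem

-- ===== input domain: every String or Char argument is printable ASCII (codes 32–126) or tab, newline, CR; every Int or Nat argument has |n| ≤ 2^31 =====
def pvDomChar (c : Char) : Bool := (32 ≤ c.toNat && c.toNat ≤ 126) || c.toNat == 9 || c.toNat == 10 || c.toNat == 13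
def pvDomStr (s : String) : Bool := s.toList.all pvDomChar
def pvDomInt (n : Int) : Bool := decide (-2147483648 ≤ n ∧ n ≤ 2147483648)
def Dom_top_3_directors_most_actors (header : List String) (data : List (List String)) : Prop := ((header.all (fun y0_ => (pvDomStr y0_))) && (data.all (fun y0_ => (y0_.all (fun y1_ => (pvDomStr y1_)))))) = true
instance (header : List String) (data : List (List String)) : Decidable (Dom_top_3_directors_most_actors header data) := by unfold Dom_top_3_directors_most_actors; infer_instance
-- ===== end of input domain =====

-- B groups the raw Actors cells per director first and counts each group afterwards, then keeps only the
-- current best three with a bounded insertion pass instead of A's full reverse sort; same results, no full sort.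

-- shared tiny helper: row_cell.split('|') (sep non-empty, so split? always returns a value)
def pvSplitp (cell : String) : List String := (PySem.Str.split? cell "|").getD []

-- ===== PORT A =====
def pvStepA (di ai : Nat) (da : PySem.Dict String (PySem.Set String)) (row : List String) :
    PySem.Dict String (PySem.Set String) :=
  let director := PySem.Str.strip ((PySem.List.pyGet? row (di : Int)).getD "")
  let actors : PySem.Set String := PySem.Set.ofList (pvSplitp ((PySem.List.pyGet? row (ai : Int)).getD ""))
  let da := if da.contains director then da else da.insert director PySem.Set.empty
  da.modify director PySem.Set.empty (fun s => PySem.Set.update s actors)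

def top_3_directors_most_actors (header : List String) (data : List (List String)) : List String :=
  match PySem.List.index? header "Director", PySem.List.index? header "Actors" with
  | some di, some ai =>
    let director_actors := data.foldl (pvStepA di ai) PySem.Dict.empty
    let director_actor_count : PySem.Dict String Int :=
      director_actors.items.foldl (fun c p => c.insert p.1 ((p.2.length : Int))) PySem.Dict.empty
    let sorted_directors :=
      PySem.List.sorted director_actor_count.keys (fun k => director_actor_count.getD k 0) true
    PySem.List.slice sorted_directors none (some 3)
  | _, _ => []  -- unreachable under Pre_: Python raises ValueError here

-- ===== PORT B =====
-- stage 1: cells.setdefault(row[director_idx].strip(), []).append(row[actors_idx])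
def pvStepB1 (di ai : Nat) (g : PySem.Dict String (List String)) (row : List String) :
    PySem.Dict String (List String) :=
  let director := PySem.Str.strip ((PySem.List.pyGet? row (di : Int)).getD "")
  let cell := (PySem.List.pyGet? row (ai : Int)).getD ""
  (g.setdefault director []).modify director [] (· ++ [cell])

-- the while loop: i = number of leading entries of top with top[i][1] >= count
def pvSkip (c : Int) : List (String × Int) → Nat
  | [] => 0
  | p :: ps => if c ≤ p.2 then pvSkip c ps + 1 else 0

-- stage 2 body: count the group's distinct actors, top.insert(i, (director, count)), del top[3:]
def pvStepB2 (top : List (String × Int)) (q : String × List String) : List (String × Int) :=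
  let count : Int := ((PySem.Set.ofList (q.2.flatMap pvSplitp)).length : Int)
  PySem.List.slice (PySem.List.insert top ((pvSkip count top : Nat) : Int) (q.1, count)) none (some 3)

def top_3_directors_most_actors_alt (header : List String) (data : List (List String)) : List String :=
  match PySem.List.index? header "Director" with
  | none => []  -- unreachable under Pre_
  | some di =>
    match PySem.List.index? header "Actors" with
    | none => []  -- unreachable under Pre_
    | some ai =>
      let cells := data.foldl (pvStepB1 di ai) PySem.Dict.empty
      (cells.items.foldl pvStepB2 []).map Prod.fst

-- ===== PRECONDITION & SPEC =====
-- Pre_ excludes exactly the inputs where Python A raises: a header missing 'Director' or 'Actors'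
-- (ValueError from header.index) or a row too short for one of the two column indices (IndexError).
def Pre_top_3_directors_most_actors (header : List String) (data : List (List String)) : Prop :=
  "Director" ∈ header ∧ "Actors" ∈ header ∧
    ∀ row ∈ data, List.idxOf "Director" header < row.length ∧ List.idxOf "Actors" header < row.length
instance (header : List String) (data : List (List String)) : Decidable (Pre_top_3_directors_most_actors header data) := by unfold Pre_top_3_directors_most_actors; infer_instance

def pvWitness_top_3_directors_most_actors : List String × List (List String) :=
  (["Director", "Actors"], [["a", "x|y"], [" a ", "y|z"]])

def Spec_top_3_directors_most_actors (header : List String) (data : List (List String)) (out : List String) : Prop := out = top_3_directors_most_actors_alt header data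
instance (header : List String) (data : List (List String)) (out : List String) : Decidable (Spec_top_3_directors_most_actors header data out) := by unfold Spec_top_3_directors_most_actors; infer_instance

-- ===== CLAIM (what is proved, stated in full; the proofs are below) =====
def Claim_equal_top_3_directors_most_actors : Prop := ∀ (header : List String) (data : List (List String)), Dom_top_3_directors_most_actors header data → Pre_top_3_directors_most_actors header data → Spec_top_3_directors_most_actors header data (top_3_directors_most_actors header data)

-- ===== LEMMAS AND PROOFS =====

-- B's pair for one grouped item, and the two insertion predicates
def pvToPair (q : String × List String) : String × Int :=
  (q.1, ((PySem.Set.ofList (q.2.flatMap pvSplitp)).length : Int))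
def pvBP : (String × Int) → (String × Int) → Bool := fun a b => decide (b.2 < a.2)

-- stage-1 invariant: A's dict-of-sets determined by B's dict-of-cell-lists
def pvInv1 (da : PySem.Dict String (PySem.Set String)) (g : PySem.Dict String (List String)) : Prop :=
  da.keys = g.keys ∧ g.keys.Nodup ∧
    ∀ d, da.get? d = (g.get? d).map (fun cs => PySem.Set.ofList (cs.flatMap pvSplitp))

theorem pvUpdate_add {α : Type} [BEq α] [LawfulBEq α] (s t : PySem.Set α) (a : α) :
    PySem.Set.update s (PySem.Set.add t a) = PySem.Set.add (PySem.Set.update s t) a := by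
  by_cases h : a ∈ t
  · have ha : a ∈ PySem.Set.update s t := by
      rw [PySem.Set.mem_update]; exact Or.inr h
    simp [PySem.Set.add, h, ha]
  · simp [PySem.Set.add, h, PySem.Set.update, List.foldl_append]

theorem pvUpdate_update {α : Type} [BEq α] [LawfulBEq α] (L : List α) (s t : PySem.Set α) :
    PySem.Set.update s (PySem.Set.update t L) = PySem.Set.update (PySem.Set.update s t) L := by
  induction L generalizing t with
  | nil => rfl
  | cons a L ih =>
    show PySem.Set.update s (PySem.Set.update (PySem.Set.add t a) L) = _
    rw [ih (PySem.Set.add t a)]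
    rw [pvUpdate_add]
    rfl

theorem pvUpdate_ofList {α : Type} [BEq α] [LawfulBEq α] (s : PySem.Set α) (L : List α) :
    PySem.Set.update s (PySem.Set.ofList L) = PySem.Set.update s L :=
  pvUpdate_update L s PySem.Set.empty

theorem pvOfList_append {α : Type} [BEq α] (X L : List α) :
    PySem.Set.ofList (X ++ L) = PySem.Set.update (PySem.Set.ofList X) L := by
  simp [PySem.Set.ofList, PySem.Set.update, List.foldl_append]

theorem pvStep1_inv (di ai : Nat) (row : List String) (da : PySem.Dict String (PySem.Set String))
    (g : PySem.Dict String (List String)) (h : pvInv1 da g) :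
    pvInv1 (pvStepA di ai da row) (pvStepB1 di ai g row) := by
  obtain ⟨hk, hnd, hget⟩ := h
  set d := PySem.Str.strip ((PySem.List.pyGet? row (di : Int)).getD "") with hd
  set cell := (PySem.List.pyGet? row (ai : Int)).getD "" with hcell
  have hcc : da.contains d = g.contains d := by
    rw [PySem.Dict.contains_eq_decide_mem_keys, PySem.Dict.contains_eq_decide_mem_keys, hk]
  by_cases hc : g.contains d = true
  · -- director already present: both overwrite in place
    obtain ⟨cs, hcs⟩ : ∃ cs, g.get? d = some cs := by
      rw [PySem.Dict.contains_eq_isSome_get?] at hc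
      exact Option.isSome_iff_exists.mp hc
    have hdas : da.get? d = some (PySem.Set.ofList (cs.flatMap pvSplitp)) := by
      rw [hget d, hcs]; rfl
    have hcA : da.contains d = true := by rw [hcc]; exact hc
    unfold pvStepA pvStepB1 PySem.Dict.modify
    simp only [← hd, ← hcell, hcA, if_true, PySem.Dict.setdefault_of_contains g [] hc]
    rw [PySem.Dict.getD_of_get?_eq_some da PySem.Set.empty hdas,
        PySem.Dict.getD_of_get?_eq_some g [] hcs]
    have hval : PySem.Set.update (PySem.Set.ofList (cs.flatMap pvSplitp))
        (PySem.Set.ofList (pvSplitp cell)) = PySem.Set.ofList ((cs ++ [cell]).flatMap pvSplitp) := by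
      rw [pvUpdate_ofList, List.flatMap_append, pvOfList_append]
      simp
    refine ⟨?_, ?_, ?_⟩
    · rw [PySem.Dict.keys_insert_of_contains da _ hcA,
        PySem.Dict.keys_insert_of_contains g _ hc]; exact hk
    · rw [PySem.Dict.keys_insert_of_contains g _ hc]; exact hnd
    · intro k
      rw [PySem.Dict.get?_insert, PySem.Dict.get?_insert]
      split
      · rw [hval]; rfl
      · exact hget k
  · -- new director: both append at the end
    have hcf : g.contains d = false := by revert hc; cases g.contains d <;> simp
    have hcAf : da.contains d = false := by rw [hcc]; exact hcf
    unfold pvStepA pvStepB1 PySem.Dict.modify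
    simp only [← hd, ← hcell, hcAf, Bool.false_eq_true, if_false,
      PySem.Dict.setdefault_of_not_contains g [] hcf]
    rw [PySem.Dict.getD_insert_self, PySem.Dict.getD_insert_self,
      PySem.Dict.insert_insert_self, PySem.Dict.insert_insert_self]
    refine ⟨?_, ?_, ?_⟩
    · rw [PySem.Dict.keys_insert_of_not_contains da _ hcAf,
        PySem.Dict.keys_insert_of_not_contains g _ hcf, hk]
    · rw [PySem.Dict.keys_insert_of_not_contains g _ hcf]
      refine List.Nodup.append hnd (List.nodup_singleton d) ?_
      intro x hx hx2
      simp only [List.mem_singleton] at hx2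
      rw [hx2] at hx
      have hxc := (PySem.Dict.contains_iff_mem_keys g d).mpr hx
      rw [hcf] at hxc
      exact Bool.false_ne_true hxc
    · intro k
      rw [PySem.Dict.get?_insert, PySem.Dict.get?_insert]
      split
      · have : PySem.Set.update PySem.Set.empty (PySem.Set.ofList (pvSplitp cell)) =
            PySem.Set.ofList (([cell] : List String).flatMap pvSplitp) := by
          rw [pvUpdate_ofList]
          simp [PySem.Set.ofList, PySem.Set.update]
        rw [this]; rfl
      · exact hget k

theorem pvFold1_inv (di ai : Nat) (data : List (List String)) :
    ∀ (da : PySem.Dict String (PySem.Set String)) (g : PySem.Dict String (List String)),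
      pvInv1 da g → pvInv1 (data.foldl (pvStepA di ai) da) (data.foldl (pvStepB1 di ai) g) := by
  induction data with
  | nil => intro da g h; exact h
  | cons row data ih =>
    intro da g h
    exact ih _ _ (pvStep1_inv di ai row da g h)

theorem pvInv1_empty : pvInv1 PySem.Dict.empty PySem.Dict.empty := by
  refine ⟨rfl, List.nodup_nil, fun d => ?_⟩
  simp [PySem.Dict.get?_empty]

-- bounded insertion = insertBy: pvSkip never exceeds the list length …
theorem pvSkip_le (c : Int) (l : List (String × Int)) : pvSkip c l ≤ l.length := by
  induction l with
  | nil => simp [pvSkip]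
  | cons p ps ih =>
    unfold pvSkip
    split
    · simp only [List.length_cons]; omega
    · simp

-- … and list.insert at the pvSkip position IS stable descending insertion
theorem pvInsert_skip (x : String × Int) (l : List (String × Int)) :
    PySem.List.insert l ((pvSkip x.2 l : Nat) : Int) x = PySem.List.insertBy pvBP x l := by
  rw [PySem.List.insert_natCast l (pvSkip x.2 l) x (pvSkip_le x.2 l)]
  induction l with
  | nil => rfl
  | cons y ys ih =>
    unfold pvSkip
    by_cases h : x.2 ≤ y.2
    · have hb : pvBP x y = false := by simp [pvBP]; omega
      simp only [h, if_true, List.take_succ_cons, List.drop_succ_cons, List.cons_append]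
      show y :: (ys.take (pvSkip x.2 ys) ++ x :: ys.drop (pvSkip x.2 ys)) = _
      rw [ih]
      show _ = (if pvBP x y = true then x :: y :: ys else y :: PySem.List.insertBy pvBP x ys)
      rw [hb]
      simp
    · have hb : pvBP x y = true := by simp [pvBP]; omega
      simp only [h, if_false]
      show x :: y :: ys = _
      show _ = (if pvBP x y = true then x :: y :: ys else y :: PySem.List.insertBy pvBP x ys)
      rw [hb]
      simp

-- truncation commutes with insertion: only the first n entries matter
theorem pvTake_insertBy {α : Type} (b : α → α → Bool) (x : α) :
    ∀ (n : Nat) (l : List α), (PySem.List.insertBy b x l).take n = (PySem.List.insertBy b x (l.take n)).take n := by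
  intro n l
  induction l generalizing n with
  | nil => simp
  | cons y ys ih =>
    cases n with
    | zero => simp
    | succ m =>
      show (PySem.List.insertBy b x (y :: ys)).take (m+1) = (PySem.List.insertBy b x (y :: ys.take m)).take (m+1)
      show (if b x y = true then x :: y :: ys else y :: PySem.List.insertBy b x ys).take (m+1) =
        (if b x y = true then x :: y :: ys.take m else y :: PySem.List.insertBy b x (ys.take m)).take (m+1)
      by_cases hb : b x y = true
      · rw [if_pos hb, if_pos hb]
        cases m with
        | zero => rfl
        | succ k =>
          simp only [List.take_succ_cons]
          rw [List.take_take, Nat.min_eq_left (by omega)]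
      · rw [if_neg hb, if_neg hb]
        simp only [List.take_succ_cons]
        rw [ih m]

-- a fold of truncated insertions is the truncation of the full insertion sort
theorem pvFold_trunc {α : Type} (b : α → α → Bool) (n : Nat) (ps : List α) :
    ∀ (acc : List α),
      ps.foldl (fun t p => (PySem.List.insertBy b p t).take n) (acc.take n) =
        (ps.foldl (fun a p => PySem.List.insertBy b p a) acc).take n := by
  induction ps with
  | nil => intro acc; rfl
  | cons p ps ih =>
    intro acc
    simp only [List.foldl_cons]
    rw [← pvTake_insertBy b p n acc]
    exact ih (PySem.List.insertBy b p acc)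

-- sorting the keys with the count-dict key = mapping fst over the pairs sorted by snd
theorem pvInsertBy_map_fst (keyf : String → Int) (x : String × Int) :
    ∀ (acc : List (String × Int)), keyf x.1 = x.2 → (∀ q ∈ acc, keyf q.1 = q.2) →
      PySem.List.insertBy (fun a b => decide (keyf b < keyf a)) x.1 (acc.map Prod.fst) =
        (PySem.List.insertBy pvBP x acc).map Prod.fst := by
  intro acc hx hacc
  induction acc with
  | nil => rfl
  | cons q qs ih =>
    show (if decide (keyf q.1 < keyf x.1) = true then x.1 :: q.1 :: qs.map Prod.fst
        else q.1 :: PySem.List.insertBy _ x.1 (qs.map Prod.fst)) = _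
    have hq : keyf q.1 = q.2 := hacc q List.mem_cons_self
    have hbp : decide (keyf q.1 < keyf x.1) = pvBP x q := by simp [pvBP, hq, hx]
    rw [hbp]
    show _ = (if pvBP x q = true then x :: q :: qs else q :: PySem.List.insertBy pvBP x qs).map Prod.fst
    by_cases hb : pvBP x q = true
    · simp [hb]
    · simp only [hb, Bool.false_eq_true, if_false, List.map_cons]
      rw [ih (fun r hr => hacc r (List.mem_cons_of_mem q hr))]

theorem pvSorted_map_fst (ps : List (String × Int)) (keyf : String → Int)
    (h : ∀ p ∈ ps, keyf p.1 = p.2) :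
    PySem.List.sorted (ps.map Prod.fst) keyf true = (PySem.List.sorted ps Prod.snd true).map Prod.fst := by
  rw [PySem.List.sorted_rev_eq_foldl_insertBy, PySem.List.sorted_rev_eq_foldl_insertBy,
    List.foldl_map]
  suffices hgen : ∀ (ps' acc : List (String × Int)), (∀ p ∈ ps', keyf p.1 = p.2) →
      (∀ q ∈ acc, keyf q.1 = q.2) →
      ps'.foldl (fun a p => PySem.List.insertBy (fun a b => decide (keyf b < keyf a)) p.1 a) (acc.map Prod.fst) =
        (ps'.foldl (fun a p => PySem.List.insertBy (fun a b => decide (b.2 < a.2)) p a) acc).map Prod.fst by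
    exact hgen ps [] h (by simp)
  intro ps'
  induction ps' with
  | nil => intro acc _ _; rfl
  | cons p ps' ih =>
    intro acc hps hacc
    simp only [List.foldl_cons]
    rw [pvInsertBy_map_fst keyf p acc (hps p List.mem_cons_self) hacc]
    refine ih _ (fun r hr => hps r (List.mem_cons_of_mem p hr)) (fun q hq => ?_)
    rcases (PySem.List.mem_insertBy pvBP p q acc).mp hq with hqp | hq
    · exact hqp ▸ hps p List.mem_cons_self
    · exact hacc q hq

-- ===== VERDICT (by name: the statement is the Claim_ definition above) =====
theorem top_3_directors_most_actors_spec : Claim_equal_top_3_directors_most_actors := by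
  intro header data _ _
  unfold Spec_top_3_directors_most_actors top_3_directors_most_actors top_3_directors_most_actors_alt
  cases h1 : PySem.List.index? header "Director" with
  | none => rfl
  | some di =>
    cases h2 : PySem.List.index? header "Actors" with
    | none => rfl
    | some ai =>
      simp only []
      obtain ⟨hk, hnd, hget⟩ :=
        pvFold1_inv di ai data PySem.Dict.empty PySem.Dict.empty pvInv1_empty
      set da := data.foldl (pvStepA di ai) PySem.Dict.empty with hda
      set g := data.foldl (pvStepB1 di ai) PySem.Dict.empty with hg
      have hndA : da.keys.Nodup := by rw [hk]; exact hnd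
      set cA : PySem.Dict String Int :=
        da.items.foldl (fun c p => c.insert p.1 ((p.2.length : Int))) PySem.Dict.empty with hcA
      have hitems : cA.items = da.items.map (fun p => (p.1, ((p.2.length : Int)))) := by
        have := PySem.Dict.items_foldl_insert_fresh da.items (fun p => p.1)
          (fun p => ((p.2.length : Int))) PySem.Dict.empty
          (fun a _ => PySem.Dict.contains_empty _) hndA
        simpa using this
      -- da's items in terms of g's items
      have hdaitems : da.items = g.items.map (fun q => (q.1, PySem.Set.ofList (q.2.flatMap pvSplitp))) := by
        rw [PySem.Dict.items_eq_map_keys da hndA PySem.Set.empty,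
          PySem.Dict.items_eq_map_keys g hnd [], List.map_map, hk]
        refine List.map_congr_left (fun k hkm => ?_)
        have hgc : g.contains k = true := (PySem.Dict.contains_iff_mem_keys g k).mpr hkm
        obtain ⟨cs, hcs⟩ : ∃ cs, g.get? k = some cs := by
          rw [PySem.Dict.contains_eq_isSome_get?] at hgc
          exact Option.isSome_iff_exists.mp hgc
        have : da.get? k = some (PySem.Set.ofList (cs.flatMap pvSplitp)) := by rw [hget k, hcs]; rfl
        rw [PySem.Dict.getD_of_get?_eq_some da PySem.Set.empty this]
        simp only [Function.comp_apply]
        rw [PySem.Dict.getD_of_get?_eq_some g [] hcs]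
      have hps : cA.items = g.items.map pvToPair := by
        rw [hitems, hdaitems, List.map_map]; rfl
      set ps : List (String × Int) := g.items.map pvToPair with hpsdef
      have hkeysA : cA.keys = ps.map Prod.fst := by
        show cA.items.map Prod.fst = _
        rw [hps]
      have hndcA : cA.keys.Nodup := by
        rw [hkeysA, hpsdef, List.map_map]
        show (g.items.map (fun q => q.1)).Nodup
        exact hnd
      have hagree : ∀ p ∈ ps, cA.getD p.1 0 = p.2 := by
        intro p hp
        refine PySem.Dict.getD_of_mem_items cA ?_ hndcA 0
        rw [hps]
        exact hp
      -- A's side: take 3 of the full descending sort, pushed through map fst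
      have hA : PySem.List.slice (PySem.List.sorted cA.keys (fun k => cA.getD k 0) true) none (some 3) =
          ((PySem.List.sorted ps Prod.snd true).take 3).map Prod.fst := by
        rw [PySem.List.slice_to _ (by norm_num : (0:Int) ≤ 3), hkeysA,
          pvSorted_map_fst ps (fun k => cA.getD k 0) hagree, List.map_take]
        rfl
      -- B's side: the truncated-insertion fold is the same take 3
      have hstep : pvStepB2 = fun (t : List (String × Int)) (q : String × List String) =>
          (PySem.List.insertBy pvBP (pvToPair q) t).take 3 := by
        funext t q
        unfold pvStepB2
        rw [PySem.List.slice_to _ (by norm_num : (0:Int) ≤ 3)]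
        exact congrArg (List.take ((3:Int)).toNat) (pvInsert_skip (pvToPair q) t)
      have hB : (g.items.foldl pvStepB2 []).map Prod.fst =
          ((PySem.List.sorted ps Prod.snd true).take 3).map Prod.fst := by
        rw [hstep]
        have : g.items.foldl (fun t q => (PySem.List.insertBy pvBP (pvToPair q) t).take 3) [] =
            ps.foldl (fun t p => (PySem.List.insertBy pvBP p t).take 3) [] := by
          rw [hpsdef, List.foldl_map]
        rw [this]
        have h0 : ([] : List (String × Int)) = ([] : List (String × Int)).take 3 := rfl
        rw [h0, pvFold_trunc pvBP 3 ps []]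
        rw [PySem.List.sorted_rev_eq_foldl_insertBy]
        rfl
      rw [hA, ← hB]
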